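-- pv_equiv track=rewrite | github.com/GitMonsters/octotetrahedral-agi | arc-puzzle-catalog/re-arc/solves/1f8318fd/solver.py | transform
-- ===== SOURCE A (Python) =====
-- import copy
-- from collections import Counter
--
-- def transform(grid):
--     rows = len(grid)
--     cols = len(grid[0])
--
--     counts = Counter()
--     for r in range(rows):
--         for c in range(cols):
--             counts[grid[r][c]] += 1
--     bg = counts.most_common(1)[0][0]
--
--     result = copy.deepcopy(grid)
--
--     color_cells = {}
--     for r in range(rows):
--         for c in range(cols):
--             v = grid[r][c]
--             if v != bg:
--                 color_cells.setdefault(v, []).append((r, c))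
--
--     for color, cells in color_cells.items():
--         min_r = min(r for r, c in cells)
--         max_r = max(r for r, c in cells)
--         min_c = min(c for r, c in cells)
--         max_c = max(c for r, c in cells)
--
--         for r in range(min_r, max_r + 1):
--             for c in range(min_c, max_c + 1):
--                 if grid[r][c] == color:
--                     row_off = r - min_r
--                     col_off = c - min_c
--                     if row_off % 2 == 1 and col_off % 2 == 1:
--                         result[r][c] = bg
--
--     return result
-- ===== SOURCE B (Python) =====
-- def transform(grid):
--     cols = len(grid[0])
--     counts = {}
--     min_r = {}
--     min_c = {}
--     for r, row in enumerate(grid):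
--         for c in range(cols):
--             v = row[c]
--             counts[v] = counts.get(v, 0) + 1
--             if v not in min_r:
--                 min_r[v] = r
--             if v not in min_c or c < min_c[v]:
--                 min_c[v] = c
--     bg = max(counts, key=counts.get)
--     out = [row[:] for row in grid]
--     for r, row in enumerate(grid):
--         for c in range(cols):
--             v = row[c]
--             if v != bg and (r - min_r[v]) % 2 == 1 and (c - min_c[v]) % 2 == 1:
--                 out[r][c] = bg
--     return out
-- ===== Notes on version B (the rewrite author's own statement) =====
-- stated objective: faster
-- what changed: One row-major pass accumulates counts and each color's minimum row/column in dicts, then a second pass over a copied grid overwrites exactly the cells whose offset from their own color's minima is odd/odd, eliminating A's per-color bounding-box rescans and cell-list building.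
import Mathlib
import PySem

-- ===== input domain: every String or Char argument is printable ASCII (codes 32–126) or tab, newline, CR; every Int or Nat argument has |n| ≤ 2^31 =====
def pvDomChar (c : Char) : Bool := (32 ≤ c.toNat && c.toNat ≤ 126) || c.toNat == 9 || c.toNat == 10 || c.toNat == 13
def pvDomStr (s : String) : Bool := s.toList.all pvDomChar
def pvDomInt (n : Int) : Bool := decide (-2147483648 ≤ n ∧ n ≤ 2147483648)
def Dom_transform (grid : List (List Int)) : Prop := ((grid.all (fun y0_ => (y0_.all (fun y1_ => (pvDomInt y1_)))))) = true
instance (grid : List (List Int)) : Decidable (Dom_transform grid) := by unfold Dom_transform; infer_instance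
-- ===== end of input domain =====

-- B replaces A's per-color bounding-box rescans by one pass accumulating counts and per-color
-- minimum row/column, then one pass rewriting each cell by offset parity (objective: faster).

-- ===== PORT A =====
-- Port of A (faithful): Counter scan, most_common(1), per-color cell lists, bbox loops writing bg.
def transform (grid : List (List Int)) : List (List Int) :=
  let rows : Int := PySem.List.len grid
  let cols : Int := PySem.List.len (PySem.List.pyGetD grid 0 [])  -- grid[0]; IndexError on [] excluded by Pre_
  let counts : PySem.Dict Int Int :=
    (PySem.List.pyRange 0 rows 1).foldl (fun d r =>
      (PySem.List.pyRange 0 cols 1).foldl (fun d c =>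
        d.modify (PySem.List.pyGetD (PySem.List.pyGetD grid r []) c 0) 0 (· + 1)) d)
      PySem.Dict.empty
  -- counts.most_common(1)[0][0]: first item of maximal count; IndexError on empty counts excluded by Pre_
  let bg : Int := ((PySem.List.max? counts.items (fun p => p.2)).getD (0, 0)).1
  let colorCells : PySem.Dict Int (List (Int × Int)) :=
    (PySem.List.pyRange 0 rows 1).foldl (fun d r =>
      (PySem.List.pyRange 0 cols 1).foldl (fun d c =>
        let v := PySem.List.pyGetD (PySem.List.pyGetD grid r []) c 0
        if v ≠ bg then d.insert v (d.getD v [] ++ [(r, c)]) else d) d)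
      PySem.Dict.empty
  colorCells.items.foldl (fun result p =>
    let minR := (PySem.List.min? (p.2.map Prod.fst) (fun x => x)).getD 0
    let maxR := (PySem.List.max? (p.2.map Prod.fst) (fun x => x)).getD 0
    let minC := (PySem.List.min? (p.2.map Prod.snd) (fun x => x)).getD 0
    let maxC := (PySem.List.max? (p.2.map Prod.snd) (fun x => x)).getD 0
    (PySem.List.pyRange minR (maxR + 1) 1).foldl (fun result r =>
      (PySem.List.pyRange minC (maxC + 1) 1).foldl (fun result c =>
        if PySem.List.pyGetD (PySem.List.pyGetD grid r []) c 0 = p.1 then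
          if PySem.Int.mod (r - minR) 2 = 1 ∧ PySem.Int.mod (c - minC) 2 = 1 then
            PySem.List.pySetD result r (PySem.List.pySetD (PySem.List.pyGetD result r []) c bg)
          else result
        else result) result) result) grid

-- ===== PORT B =====
-- Port of B: one pass accumulating counts and per-color min row / min col,
-- then a second pass over a copied grid overwriting the odd-offset cells.
def transform_alt (grid : List (List Int)) : List (List Int) :=
  let cols : Int := PySem.List.len (PySem.List.pyGetD grid 0 [])  -- grid[0]; IndexError on [] excluded by Pre_
  let st :=
    (PySem.List.enumerate grid).foldl (fun st rw =>
      (PySem.List.pyRange 0 cols 1).foldl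
        (fun (st : PySem.Dict Int Int × PySem.Dict Int Int × PySem.Dict Int Int) c =>
          let v := PySem.List.pyGetD rw.2 c 0
          (st.1.insert v (st.1.getD v 0 + 1),
           (if st.2.1.contains v then st.2.1 else st.2.1.insert v rw.1),
           (if ¬ st.2.2.contains v ∨ c < st.2.2.getD v 0 then st.2.2.insert v c else st.2.2))) st)
      (PySem.Dict.empty, PySem.Dict.empty, PySem.Dict.empty)
  -- max(counts, key=counts.get): first key of maximal count; ValueError on empty excluded by Pre_
  let bg : Int := (PySem.List.max? st.1.keys (fun k => st.1.getD k 0)).getD 0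
  let out := grid.map (fun row => PySem.List.slice row none none)  -- [row[:] for row in grid]
  (PySem.List.enumerate grid).foldl (fun out rw =>
    (PySem.List.pyRange 0 cols 1).foldl (fun out c =>
      let v := PySem.List.pyGetD rw.2 c 0
      if v ≠ bg ∧ PySem.Int.mod (rw.1 - st.2.1.getD v 0) 2 = 1 ∧
           PySem.Int.mod (c - st.2.2.getD v 0) 2 = 1 then
        PySem.List.pySetD out rw.1 (PySem.List.pySetD (PySem.List.pyGetD out rw.1 []) c bg)
      else out) out) out

-- ===== PRECONDITION & SPEC =====
-- Pre_ excludes exactly the inputs where A raises: the empty grid and an empty first row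
-- (IndexError on grid[0] / most_common(1)[0]) and grids with a row shorter than the first
-- row (IndexError on grid[r][c]).
def Pre_transform (grid : List (List Int)) : Prop :=
  grid ≠ [] ∧ grid.headD [] ≠ [] ∧ ∀ row ∈ grid, (grid.headD []).length ≤ row.length
instance (grid : List (List Int)) : Decidable (Pre_transform grid) := by
  unfold Pre_transform; infer_instance
def pvWitness_transform : List (List Int) := [[1, 1], [1, 2]]

def Spec_transform (grid : List (List Int)) (out : List (List Int)) : Prop := out = transform_alt grid
instance (grid : List (List Int)) (out : List (List Int)) : Decidable (Spec_transform grid out) := by unfold Spec_transform; infer_instance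

-- ===== CLAIM (what is proved, stated in full; the proofs are below) =====
def Claim_equal_transform : Prop := ∀ (grid : List (List Int)), Dom_transform grid → Pre_transform grid → Spec_transform grid (transform grid)

-- ===== LEMMAS AND PROOFS =====

def pvVal (grid : List (List Int)) (p : Int × Int) : Int :=
  PySem.List.pyGetD (PySem.List.pyGetD grid p.1 []) p.2 0

def pvCells (rows cols : Int) : List (Int × Int) :=
  (PySem.List.pyRange 0 rows 1).flatMap (fun r => (PySem.List.pyRange 0 cols 1).map (fun c => (r, c)))

theorem pv_foldl_cells {σ : Type} (rows cols : Int) (f : σ → (Int × Int) → σ) (i : σ) :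
    (PySem.List.pyRange 0 rows 1).foldl
      (fun a r => (PySem.List.pyRange 0 cols 1).foldl (fun a c => f a (r, c)) a) i
    = (pvCells rows cols).foldl f i := by
  simp [pvCells, List.foldl_flatMap, List.foldl_map]

theorem pv_max?_map {α α' : Type} (g : α → α') (f : α' → Int) (l : List α) :
    PySem.List.max? (l.map g) f = (PySem.List.max? l (fun x => f (g x))).map g := by
  suffices h : ∀ (o : Option α),
      List.foldl (fun acc x => match acc with
        | none => some (g x)
        | some m => if f m < f (g x) then some (g x) else some m) (o.map g) l
      = (List.foldl (fun acc x => match acc with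
        | none => some x
        | some m => if f (g m) < f (g x) then some x else some m) o l).map g by
    have := h none
    simpa [PySem.List.max?, List.foldl_map] using this
  intro o
  induction l generalizing o with
  | nil => rfl
  | cons x t ih =>
    cases o with
    | none => simpa using ih (some x)
    | some m =>
      simp only [List.foldl_cons, Option.map_some]
      by_cases h : f (g m) < f (g x)
      · simp only [if_pos h]
        simpa using ih (some x)
      · simp only [if_neg h]
        simpa using ih (some m)

theorem pv_foldl_nested {σ : Type} (l1 l2 : List Int) (f : σ → (Int × Int) → σ) (i : σ) :
    l1.foldl (fun a r => l2.foldl (fun a c => f a (r, c)) a) i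
    = (l1.flatMap (fun r => l2.map (fun c => (r, c)))).foldl f i := by
  simp [List.foldl_flatMap, List.foldl_map]

def pvOmin (o : Option Int) (c : Int) : Option Int :=
  some (match o with | none => c | some m => min m c)

theorem pv_min?_eq_omin (l : List Int) :
    PySem.List.min? l (fun x => x) = l.foldl pvOmin none := by
  show List.foldl _ none _ = _
  apply PySem.List.foldl_congr_mem
  intro o c _
  cases o with
  | none => rfl
  | some m =>
    show (if c < m then some c else some m) = some (min m c)
    by_cases h : c < m
    · rw [if_pos h]; congr 1; omega
    · rw [if_neg h]; congr 1; omega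

theorem pv_min?_head (l : List Int) (h : l.Pairwise (· ≤ ·)) :
    PySem.List.min? l (fun x => x) = l.head? := by
  cases l with
  | nil => rfl
  | cons x t =>
    rw [PySem.List.min?_id_cons]
    simp only [List.head?_cons]
    have hle : ∀ y ∈ t, x ≤ y := (List.pairwise_cons.mp h).1
    have h1 := PySem.List.foldl_min_le t x
    have h2 := PySem.List.foldl_min_mem t x
    rcases h2 with h2 | h2
    · rw [h2]
    · exact congrArg some (le_antisymm h1.1 (hle _ h2))

theorem pv_first_insert_get? {β : Type} (key : β → Int) (g : β → Int) (l : List β) (v : Int) :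
    ∀ d : PySem.Dict Int Int,
    (l.foldl (fun d x => if d.contains (key x) then d else d.insert (key x) (g x)) d).get? v
      = (d.get? v).or ((l.find? (fun x => key x == v)).map g) := by
  induction l with
  | nil => intro d; simp
  | cons x t ih =>
    intro d
    simp only [List.foldl_cons]
    by_cases hk : key x = v
    · rw [List.find?_cons_of_pos (by simp [hk])]
      by_cases hc : d.contains (key x) = true
      · rw [if_pos hc, ih d]
        have hs : (d.get? v).isSome := by
          rw [hk, PySem.Dict.contains_eq_isSome_get?] at hc; exact hc
        obtain ⟨s, hs⟩ := Option.isSome_iff_exists.mp hs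
        simp [hs]
      · rw [if_neg hc, ih _]
        have hn : d.get? v = none := by
          rw [← hk]; rw [PySem.Dict.get?_eq_none_iff_contains]; simpa using hc
        rw [← hk, PySem.Dict.get?_insert_self]
        simp [hk ▸ hn]
    · rw [List.find?_cons_of_neg (by simp [hk])]
      by_cases hc : d.contains (key x) = true
      · rw [if_pos hc, ih d]
      · rw [if_neg hc, ih _, PySem.Dict.get?_insert_of_ne _ _ (fun h => hk h.symm)]

theorem pv_min_insert_get? {β : Type} (key : β → Int) (g : β → Int) (l : List β) (v : Int) :
    ∀ d : PySem.Dict Int Int,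
    (l.foldl (fun d x =>
        if ¬ d.contains (key x) = true ∨ g x < d.getD (key x) 0 then d.insert (key x) (g x) else d) d).get? v
      = ((l.filter (fun x => key x == v)).map g).foldl pvOmin (d.get? v) := by
  induction l with
  | nil => intro d; simp
  | cons x t ih =>
    intro d
    simp only [List.foldl_cons]
    by_cases hk : key x = v
    · rw [List.filter_cons_of_pos (by simp [hk])]
      simp only [List.map_cons, List.foldl_cons]
      by_cases hc : d.contains (key x) = true
      · have hs : (d.get? v).isSome := by
          rw [hk, PySem.Dict.contains_eq_isSome_get?] at hc; exact hc
        obtain ⟨s, hs⟩ := Option.isSome_iff_exists.mp hs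
        have hgd : d.getD (key x) 0 = s := by
          rw [PySem.Dict.getD_eq_get?_getD, hk, hs]; rfl
        by_cases hlt : g x < d.getD (key x) 0
        · rw [if_pos (Or.inr hlt), ih _]
          rw [← hk, PySem.Dict.get?_insert_self, hk]
          rw [hs]
          have : pvOmin (some s) (g x) = some (g x) := by
            simp only [pvOmin]; congr 1; rw [hgd] at hlt; omega
          rw [this]
        · rw [if_neg (by rw [hc]; simpa using hlt), ih d, hs]
          have : pvOmin (some s) (g x) = some s := by
            simp only [pvOmin]; congr 1; rw [hgd] at hlt; omega
          rw [this]
      · have hn : d.get? v = none := by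
          rw [← hk, PySem.Dict.get?_eq_none_iff_contains]; simpa using hc
        rw [if_pos (Or.inl (by simpa using hc)), ih _]
        rw [← hk, PySem.Dict.get?_insert_self, hk, hn]
        rfl
    · rw [List.filter_cons_of_neg (by simp [hk])]
      by_cases hc : d.contains (key x) = true
      · by_cases hlt : g x < d.getD (key x) 0
        · rw [if_pos (Or.inr hlt), ih _, PySem.Dict.get?_insert_of_ne _ _ (fun h => hk h.symm)]
        · rw [if_neg (by rw [hc]; simpa using hlt), ih d]
      · rw [if_pos (Or.inl (by simpa using hc)), ih _,
            PySem.Dict.get?_insert_of_ne _ _ (fun h => hk h.symm)]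

def pvGet2 (m : List (List Int)) (r c : Int) : Int :=
  PySem.List.pyGetD (PySem.List.pyGetD m r []) c 0

def pvUpd (bg : Int) (m : List (List Int)) (p : Int × Int) : List (List Int) :=
  PySem.List.pySetD m p.1 (PySem.List.pySetD (PySem.List.pyGetD m p.1 []) p.2 bg)

theorem pv_upd_len (bg : Int) (m : List (List Int)) (p : Int × Int) :
    (pvUpd bg m p).length = m.length := PySem.List.length_pySetD _ _ _

theorem pv_upd_rowlen (bg : Int) (m : List (List Int)) (p : Int × Int) (h1 : 0 ≤ p.1) (i : Nat) :
    ((pvUpd bg m p)[i]?).map List.length = (m[i]?).map List.length := by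
  unfold pvUpd
  rw [PySem.List.pySetD_of_nonneg _ _ h1, List.getElem?_set]
  by_cases hi : p.1.toNat = i
  · rw [if_pos hi]
    by_cases hlt : p.1.toNat < m.length
    · rw [if_pos (hi ▸ hlt)]
      subst hi
      rw [List.getElem?_eq_getElem hlt]
      simp only [Option.map_some, Option.some.injEq]
      rw [PySem.List.length_pySetD, PySem.List.pyGetD_of_nonneg _ _ h1]
      simp [List.getD_eq_getElem?_getD, List.getElem?_eq_getElem hlt]
    · rw [if_neg (hi ▸ hlt), List.getElem?_eq_none (by omega)]
  · rw [if_neg hi]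

theorem pv_upd_get2 (bg : Int) (m : List (List Int)) (p : Int × Int)
    (h1 : 0 ≤ p.1) (h1' : p.1 < (m.length : Int))
    (h2 : 0 ≤ p.2) (h2' : p.2 < ((m.getD p.1.toNat []).length : Int))
    (r c : Int) (hr : 0 ≤ r) (hc : 0 ≤ c) :
    pvGet2 (pvUpd bg m p) r c = if r = p.1 ∧ c = p.2 then bg else pvGet2 m r c := by
  have hk : p.1.toNat < m.length := by omega
  unfold pvUpd pvGet2
  rw [PySem.List.pySetD_of_nonneg _ _ h1]
  rw [PySem.List.pyGetD_of_nonneg _ _ hr]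
  rw [List.getD_eq_getElem?_getD, List.getElem?_set]
  by_cases hrp : r = p.1
  · rw [if_pos (by omega : p.1.toNat = r.toNat)]
    rw [if_pos hk]
    simp only [Option.getD_some]
    rw [PySem.List.pySetD_of_nonneg _ _ h2]
    rw [PySem.List.pyGetD_of_nonneg _ _ hc, List.getD_eq_getElem?_getD, List.getElem?_set]
    by_cases hcp : c = p.2
    · rw [if_pos (by omega : p.2.toNat = c.toNat)]
      rw [if_pos (by rw [PySem.List.pyGetD_of_nonneg _ _ h1]; omega)]
      rw [if_pos ⟨hrp, hcp⟩]
      rfl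
    · rw [if_neg (by omega : ¬ p.2.toNat = c.toNat)]
      rw [if_neg (by tauto)]
      simp [PySem.List.pyGetD_of_nonneg _ _ h1, PySem.List.pyGetD_of_nonneg _ _ hc,
            List.getD_eq_getElem?_getD, hrp]
  · rw [if_neg (by omega : ¬ p.1.toNat = r.toNat)]
    rw [if_neg (by tauto)]
    simp [PySem.List.pyGetD_of_nonneg _ _ hr, PySem.List.pyGetD_of_nonneg _ _ hc,
          List.getD_eq_getElem?_getD]

theorem pv_foldl_upd (bg : Int) (L : List (Int × Int)) :
    ∀ (m : List (List Int)),
    (∀ p ∈ L, 0 ≤ p.1 ∧ p.1 < (m.length : Int) ∧ 0 ≤ p.2 ∧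
        p.2 < ((m.getD p.1.toNat []).length : Int)) →
    (L.foldl (pvUpd bg) m).length = m.length ∧
    (∀ i : Nat, ((L.foldl (pvUpd bg) m)[i]?).map List.length = (m[i]?).map List.length) ∧
    (∀ r c : Int, 0 ≤ r → 0 ≤ c →
      pvGet2 (L.foldl (pvUpd bg) m) r c = if (r, c) ∈ L then bg else pvGet2 m r c) := by
  induction L with
  | nil => intro m _; exact ⟨rfl, fun _ => rfl, fun r c _ _ => by simp⟩
  | cons p t ih =>
    intro m hb
    have hp := hb p List.mem_cons_self
    have hb' : ∀ q ∈ t, 0 ≤ q.1 ∧ q.1 < ((pvUpd bg m p).length : Int) ∧ 0 ≤ q.2 ∧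
        q.2 < (((pvUpd bg m p).getD q.1.toNat []).length : Int) := by
      intro q hq
      have h := hb q (List.mem_cons_of_mem _ hq)
      refine ⟨h.1, by rw [pv_upd_len]; exact h.2.1, h.2.2.1, ?_⟩
      have hrl := pv_upd_rowlen bg m p hp.1 q.1.toNat
      have hlen := pv_upd_len bg m p
      have hq1 : q.1.toNat < m.length := by omega
      have hq2 : q.1.toNat < (pvUpd bg m p).length := by omega
      rw [List.getElem?_eq_getElem hq2, List.getElem?_eq_getElem hq1] at hrl
      simp only [Option.map_some, Option.some.injEq] at hrl
      rw [List.getD_eq_getElem?_getD, List.getElem?_eq_getElem hq2]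
      simp only [Option.getD_some]
      rw [hrl]
      have h4 := h.2.2.2
      rw [List.getD_eq_getElem?_getD, List.getElem?_eq_getElem hq1] at h4
      simpa using h4
    obtain ⟨l1, l2, l3⟩ := ih (pvUpd bg m p) hb'
    simp only [List.foldl_cons]
    refine ⟨by rw [l1, pv_upd_len], ?_, ?_⟩
    · intro i; rw [l2 i, pv_upd_rowlen bg m p hp.1 i]
    · intro r c hr hc
      rw [l3 r c hr hc, pv_upd_get2 bg m p hp.1 hp.2.1 hp.2.2.1 hp.2.2.2 r c hr hc]
      by_cases h1 : (r, c) ∈ t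
      · rw [if_pos h1, if_pos (List.mem_cons_of_mem _ h1)]
      · rw [if_neg h1]
        by_cases h2 : r = p.1 ∧ c = p.2
        · rw [if_pos h2, if_pos (by simp [List.mem_cons, Prod.ext_iff]; tauto)]
        · rw [if_neg h2, if_neg (by simp [List.mem_cons, Prod.ext_iff]; tauto)]

def pvRows (grid : List (List Int)) : Int := PySem.List.len grid
def pvCols (grid : List (List Int)) : Int := PySem.List.len (PySem.List.pyGetD grid 0 [])
def pvVals (grid : List (List Int)) : List Int :=
  (pvCells (pvRows grid) (pvCols grid)).map (pvVal grid)
def pvBg (grid : List (List Int)) : Int :=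
  (PySem.List.max? (PySem.Set.ofList (pvVals grid)) (fun k => ((pvVals grid).count k : Int))).getD 0
def pvOccAll (grid : List (List Int)) (v : Int) : List (Int × Int) :=
  (pvCells (pvRows grid) (pvCols grid)).filter (fun p => pvVal grid p == v)
def pvMinR (grid : List (List Int)) (v : Int) : Int :=
  (PySem.List.min? ((pvOccAll grid v).map Prod.fst) (fun x => x)).getD 0
def pvMinC (grid : List (List Int)) (v : Int) : Int :=
  (PySem.List.min? ((pvOccAll grid v).map Prod.snd) (fun x => x)).getD 0

theorem pv_mem_cells (rows cols : Int) (p : Int × Int) :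
    p ∈ pvCells rows cols ↔ 0 ≤ p.1 ∧ p.1 < rows ∧ 0 ≤ p.2 ∧ p.2 < cols := by
  cases p with
  | mk r c =>
    simp only [pvCells, List.mem_flatMap, List.mem_map, PySem.List.mem_pyRange_one,
      Prod.mk.injEq]
    constructor
    · rintro ⟨a, ⟨h1, h2⟩, b, ⟨h3, h4⟩, rfl, rfl⟩; exact ⟨h1, h2, h3, h4⟩
    · rintro ⟨h1, h2, h3, h4⟩; exact ⟨r, ⟨h1, h2⟩, c, ⟨h3, h4⟩, rfl, rfl⟩

theorem pv_cells_pairwise (rows cols : Int) :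
    (pvCells rows cols).Pairwise (fun p q => p.1 ≤ q.1) := by
  apply List.pairwise_flatMap.mpr
  refine ⟨fun a _ => ?_, ?_⟩
  · apply List.pairwise_map.mpr
    exact (PySem.List.pairwise_lt_pyRange_one 0 cols).imp (fun _ => le_refl a)
  · apply (PySem.List.pairwise_lt_pyRange_one 0 rows).imp
    intro a b h x hx y hy
    obtain ⟨c1, _, rfl⟩ := List.mem_map.mp hx
    obtain ⟨c2, _, rfl⟩ := List.mem_map.mp hy
    exact le_of_lt h

theorem pv_bg_eq (grid : List (List Int)) :
    ((PySem.List.max? (PySem.Dict.counter (pvVals grid)).items (fun p => p.2)).getD (0, 0)).1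
    = (PySem.List.max? (PySem.Dict.counter (pvVals grid)).keys
        (fun k => (PySem.Dict.counter (pvVals grid)).getD k 0)).getD 0 := by
  have hgd : (fun k => (PySem.Dict.counter (pvVals grid)).getD k 0)
      = fun k => ((pvVals grid).count k : Int) :=
    funext fun k => PySem.Dict.getD_counter _ _
  rw [PySem.Dict.items_counter, PySem.Dict.keys_counter, hgd,
      pv_max?_map (fun k => (k, ((pvVals grid).count k : Int))) (fun p => p.2)]
  cases PySem.List.max? (PySem.Set.ofList (pvVals grid)) (fun k => ((pvVals grid).count k : Int)) with
  | none => rfl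
  | some k => rfl

theorem pv_bgB_eq (grid : List (List Int)) :
    (PySem.List.max? (PySem.Dict.counter (pvVals grid)).keys
        (fun k => (PySem.Dict.counter (pvVals grid)).getD k 0)).getD 0 = pvBg grid := by
  have hgd : (fun k => (PySem.Dict.counter (pvVals grid)).getD k 0)
      = fun k => ((pvVals grid).count k : Int) :=
    funext fun k => PySem.Dict.getD_counter _ _
  rw [PySem.Dict.keys_counter, hgd, pvBg]

def pvCellsNB (grid : List (List Int)) : List (Int × Int) :=
  (pvCells (pvRows grid) (pvCols grid)).filter (fun p => decide (pvVal grid p ≠ pvBg grid))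
def pvDistinct (grid : List (List Int)) : List Int :=
  PySem.Set.ofList ((pvCellsNB grid).map (pvVal grid))
def pvMaxR (grid : List (List Int)) (v : Int) : Int :=
  (PySem.List.max? ((pvOccAll grid v).map Prod.fst) (fun x => x)).getD 0
def pvMaxC (grid : List (List Int)) (v : Int) : Int :=
  (PySem.List.max? ((pvOccAll grid v).map Prod.snd) (fun x => x)).getD 0

theorem pv_occNB_eq (grid : List (List Int)) (v : Int) (hv : v ≠ pvBg grid) :
    (pvCellsNB grid).filter (fun p => pvVal grid p == v) = pvOccAll grid v := by
  rw [pvCellsNB, List.filter_filter, pvOccAll]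
  apply List.filter_congr
  intro p _
  by_cases h : pvVal grid p = v
  · simp [h, hv]
  · simp [h]

theorem pv_mem_distinct (grid : List (List Int)) (v : Int) :
    v ∈ pvDistinct grid ↔ v ≠ pvBg grid ∧ pvOccAll grid v ≠ [] := by
  rw [pvDistinct, PySem.Set.mem_ofList]
  constructor
  · rintro h
    obtain ⟨p, hp, rfl⟩ := List.mem_map.mp h
    obtain ⟨hpc, hpv⟩ := List.mem_filter.mp hp
    have hne : pvVal grid p ≠ pvBg grid := by simpa using hpv
    refine ⟨hne, ?_⟩
    intro hemp
    have hmem : p ∈ pvOccAll grid (pvVal grid p) := List.mem_filter.mpr ⟨hpc, by simp⟩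
    rw [hemp] at hmem
    simp at hmem
  · rintro ⟨hne, hocc⟩
    obtain ⟨p, hp⟩ := List.exists_mem_of_ne_nil _ hocc
    obtain ⟨hpc, hpv⟩ := List.mem_filter.mp hp
    have hpv' : pvVal grid p = v := by simpa using hpv
    exact List.mem_map.mpr ⟨p, List.mem_filter.mpr ⟨hpc, by simp [hpv', hne]⟩, hpv'⟩

theorem pv_minRdict_getD (grid : List (List Int)) (v : Int) :
    ((pvCells (pvRows grid) (pvCols grid)).foldl
      (fun d p => if d.contains (pvVal grid p) then d else d.insert (pvVal grid p) p.1)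
      PySem.Dict.empty).getD v 0 = pvMinR grid v := by
  rw [PySem.Dict.getD_eq_get?_getD,
      pv_first_insert_get? (pvVal grid) Prod.fst (pvCells (pvRows grid) (pvCols grid)) v
        PySem.Dict.empty]
  have hemp : (PySem.Dict.empty : PySem.Dict Int Int).get? v = none := PySem.Dict.get?_empty _
  rw [hemp]
  rw [pvMinR]
  rw [pv_min?_head]
  · rw [← List.head?_filter]
    rw [List.head?_map]
    rfl
  · apply List.pairwise_map.mpr
    exact (pv_cells_pairwise _ _).filter _

theorem pv_minCdict_getD (grid : List (List Int)) (v : Int) :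
    ((pvCells (pvRows grid) (pvCols grid)).foldl
      (fun d p => if ¬ d.contains (pvVal grid p) = true ∨ p.2 < d.getD (pvVal grid p) 0
        then d.insert (pvVal grid p) p.2 else d)
      PySem.Dict.empty).getD v 0 = pvMinC grid v := by
  rw [PySem.Dict.getD_eq_get?_getD,
      pv_min_insert_get? (pvVal grid) Prod.snd (pvCells (pvRows grid) (pvCols grid)) v
        PySem.Dict.empty]
  have hemp : (PySem.Dict.empty : PySem.Dict Int Int).get? v = none := PySem.Dict.get?_empty _
  rw [hemp, pvMinC, pv_min?_eq_omin, pvOccAll]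

theorem pv_min?_some (l : List Int) (h : l ≠ []) :
    ∃ m, PySem.List.min? l (fun x => x) = some m := by
  cases hm : PySem.List.min? l (fun x => x) with
  | none => exact absurd ((PySem.List.min?_eq_none_iff _ _).mp hm) h
  | some m => exact ⟨m, rfl⟩

theorem pv_max?_some (l : List Int) (h : l ≠ []) :
    ∃ m, PySem.List.max? l (fun x => x) = some m := by
  cases hm : PySem.List.max? l (fun x => x) with
  | none => exact absurd ((PySem.List.max?_eq_none_iff _ _).mp hm) h
  | some m => exact ⟨m, rfl⟩

def pvItems (grid : List (List Int)) : List (Int × List (Int × Int)) :=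
  (pvDistinct grid).map (fun v => (v, pvOccAll grid v))

theorem pv_colorCells_items (grid : List (List Int)) :
    ((pvCellsNB grid).foldl
      (fun d p => d.insert (pvVal grid p) (d.getD (pvVal grid p) [] ++ [p]))
      (PySem.Dict.empty : PySem.Dict Int (List (Int × Int)))).items = pvItems grid := by
  have hnodup : ((pvCellsNB grid).foldl
      (fun d p => d.insert (pvVal grid p) (d.getD (pvVal grid p) [] ++ [p]))
      (PySem.Dict.empty : PySem.Dict Int (List (Int × Int)))).keys.Nodup :=
    PySem.Dict.nodup_keys_foldl_insert_key _ (pvVal grid) _ _ (by simp [PySem.Dict.keys_empty])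
  rw [PySem.Dict.items_eq_map_keys _ hnodup []]
  have hkeys : ((pvCellsNB grid).foldl
      (fun d p => d.insert (pvVal grid p) (d.getD (pvVal grid p) [] ++ [p]))
      (PySem.Dict.empty : PySem.Dict Int (List (Int × Int)))).keys = pvDistinct grid := by
    rw [PySem.Dict.keys_foldl_insert_key _ (pvVal grid)]
    rw [PySem.Dict.keys_empty, PySem.Set.update_nil_left, pvDistinct]
  rw [hkeys, pvItems]
  apply List.map_congr_left
  intro v hv
  have hne : v ≠ pvBg grid := ((pv_mem_distinct grid v).mp hv).1
  have hfold : (pvCellsNB grid).foldl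
      (fun d p => d.insert (pvVal grid p) (d.getD (pvVal grid p) [] ++ [p]))
      (PySem.Dict.empty : PySem.Dict Int (List (Int × Int)))
      = ((pvCellsNB grid).map (fun p => (pvVal grid p, p))).foldl
        (fun d q => d.modify q.1 [] (· ++ [q.2])) PySem.Dict.empty := by
    rw [List.foldl_map]; rfl
  rw [hfold, Prod.mk.injEq]
  refine ⟨rfl, ?_⟩
  rw [PySem.Dict.getD_foldl_modify_append, PySem.Dict.getD_empty, List.nil_append]
  rw [List.filter_map, List.map_map]
  have hfn1 : ((fun (q : Int × (Int × Int)) => q.1 == v) ∘ fun p : Int × Int => (pvVal grid p, p))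
      = (fun p : Int × Int => pvVal grid p == v) := rfl
  have hfn2 : ((fun (q : Int × (Int × Int)) => q.2) ∘ fun p : Int × Int => (pvVal grid p, p))
      = (fun p : Int × Int => p) := rfl
  rw [hfn1, hfn2, List.map_id', pv_occNB_eq grid v hne]

theorem pv_mem_prod (a b a' b' : Int) (p : Int × Int) :
    p ∈ (PySem.List.pyRange a b 1).flatMap
        (fun r => (PySem.List.pyRange a' b' 1).map (fun c => (r, c)))
      ↔ a ≤ p.1 ∧ p.1 < b ∧ a' ≤ p.2 ∧ p.2 < b' := by
  cases p with
  | mk r c =>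
    simp only [List.mem_flatMap, List.mem_map, PySem.List.mem_pyRange_one, Prod.mk.injEq]
    constructor
    · rintro ⟨x, ⟨h1, h2⟩, y, ⟨h3, h4⟩, rfl, rfl⟩; exact ⟨h1, h2, h3, h4⟩
    · rintro ⟨h1, h2, h3, h4⟩; exact ⟨r, ⟨h1, h2⟩, c, ⟨h3, h4⟩, rfl, rfl⟩

def pvTL (grid : List (List Int)) : List (Int × Int) :=
  (pvItems grid).flatMap (fun q =>
    ((PySem.List.pyRange ((PySem.List.min? (q.2.map Prod.fst) (fun x => x)).getD 0)
        ((PySem.List.max? (q.2.map Prod.fst) (fun x => x)).getD 0 + 1) 1).flatMap (fun r =>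
      (PySem.List.pyRange ((PySem.List.min? (q.2.map Prod.snd) (fun x => x)).getD 0)
        ((PySem.List.max? (q.2.map Prod.snd) (fun x => x)).getD 0 + 1) 1).map
        (fun c => (r, c)))).filter
      (fun p => decide (pvVal grid p = q.1 ∧
        (PySem.Int.mod (p.1 - (PySem.List.min? (q.2.map Prod.fst) (fun x => x)).getD 0) 2 = 1 ∧
         PySem.Int.mod (p.2 - (PySem.List.min? (q.2.map Prod.snd) (fun x => x)).getD 0) 2 = 1))))

theorem pv_occ_bounds (grid : List (List Int)) (v : Int) (p : Int × Int)
    (hp : p ∈ pvOccAll grid v) :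
    pvMinR grid v ≤ p.1 ∧ p.1 ≤ pvMaxR grid v ∧ pvMinC grid v ≤ p.2 ∧ p.2 ≤ pvMaxC grid v := by
  have h1 : p.1 ∈ (pvOccAll grid v).map Prod.fst := List.mem_map.mpr ⟨p, hp, rfl⟩
  have h2 : p.2 ∈ (pvOccAll grid v).map Prod.snd := List.mem_map.mpr ⟨p, hp, rfl⟩
  have hne1 : (pvOccAll grid v).map Prod.fst ≠ [] := List.ne_nil_of_mem h1
  have hne2 : (pvOccAll grid v).map Prod.snd ≠ [] := List.ne_nil_of_mem h2
  obtain ⟨m1, hm1⟩ := pv_min?_some _ hne1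
  obtain ⟨m2, hm2⟩ := pv_max?_some _ hne1
  obtain ⟨m3, hm3⟩ := pv_min?_some _ hne2
  obtain ⟨m4, hm4⟩ := pv_max?_some _ hne2
  refine ⟨?_, ?_, ?_, ?_⟩
  · rw [pvMinR, hm1]; exact PySem.List.min?_isMin hm1 _ h1
  · rw [pvMaxR, hm2]; exact PySem.List.max?_isMax hm2 _ h1
  · rw [pvMinC, hm3]; exact PySem.List.min?_isMin hm3 _ h2
  · rw [pvMaxC, hm4]; exact PySem.List.max?_isMax hm4 _ h2

theorem pv_minmax_in_range (grid : List (List Int)) (v : Int)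
    (hocc : pvOccAll grid v ≠ []) :
    0 ≤ pvMinR grid v ∧ pvMaxR grid v < pvRows grid ∧
    0 ≤ pvMinC grid v ∧ pvMaxC grid v < pvCols grid := by
  have hne1 : (pvOccAll grid v).map Prod.fst ≠ [] := by simpa using hocc
  have hne2 : (pvOccAll grid v).map Prod.snd ≠ [] := by simpa using hocc
  obtain ⟨m1, hm1⟩ := pv_min?_some _ hne1
  obtain ⟨m2, hm2⟩ := pv_max?_some _ hne1
  obtain ⟨m3, hm3⟩ := pv_min?_some _ hne2
  obtain ⟨m4, hm4⟩ := pv_max?_some _ hne2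
  have hcell : ∀ q ∈ pvOccAll grid v, 0 ≤ q.1 ∧ q.1 < pvRows grid ∧ 0 ≤ q.2 ∧ q.2 < pvCols grid := by
    intro q hq
    exact (pv_mem_cells _ _ q).mp (List.mem_filter.mp hq).1
  refine ⟨?_, ?_, ?_, ?_⟩
  · rw [pvMinR, hm1]
    obtain ⟨q, hq, rfl⟩ := List.mem_map.mp (PySem.List.min?_mem hm1)
    exact (hcell q hq).1
  · rw [pvMaxR, hm2]
    obtain ⟨q, hq, rfl⟩ := List.mem_map.mp (PySem.List.max?_mem hm2)
    exact (hcell q hq).2.1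
  · rw [pvMinC, hm3]
    obtain ⟨q, hq, rfl⟩ := List.mem_map.mp (PySem.List.min?_mem hm3)
    exact (hcell q hq).2.2.1
  · rw [pvMaxC, hm4]
    obtain ⟨q, hq, rfl⟩ := List.mem_map.mp (PySem.List.max?_mem hm4)
    exact (hcell q hq).2.2.2

theorem pv_TL_mem (grid : List (List Int)) (p : Int × Int) :
    p ∈ pvTL grid ↔ ∃ v ∈ pvDistinct grid,
      (pvMinR grid v ≤ p.1 ∧ p.1 ≤ pvMaxR grid v ∧
       pvMinC grid v ≤ p.2 ∧ p.2 ≤ pvMaxC grid v) ∧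
      pvVal grid p = v ∧
      PySem.Int.mod (p.1 - pvMinR grid v) 2 = 1 ∧
      PySem.Int.mod (p.2 - pvMinC grid v) 2 = 1 := by
  rw [pvTL, pvItems]
  constructor
  · intro h
    obtain ⟨lq, hlq, hpl⟩ := List.mem_flatMap.mp h
    obtain ⟨v, hv, rfl⟩ := List.mem_map.mp hlq
    obtain ⟨hmem, hcond⟩ := List.mem_filter.mp hpl
    rw [pv_mem_prod] at hmem
    have b1 : pvMinR grid v ≤ p.1 := hmem.1
    have b2 : p.1 ≤ pvMaxR grid v := by
      have hx : p.1 < (PySem.List.max? ((pvOccAll grid v).map Prod.fst) (fun x => x)).getD 0 + 1 :=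
        hmem.2.1
      unfold pvMaxR; omega
    have b3 : pvMinC grid v ≤ p.2 := hmem.2.2.1
    have b4 : p.2 ≤ pvMaxC grid v := by
      have hx : p.2 < (PySem.List.max? ((pvOccAll grid v).map Prod.snd) (fun x => x)).getD 0 + 1 :=
        hmem.2.2.2
      unfold pvMaxC; omega
    obtain ⟨hval, h1, h2⟩ := of_decide_eq_true hcond
    have hval' : pvVal grid p = v := hval
    have h1' : PySem.Int.mod (p.1 - pvMinR grid v) 2 = 1 := h1
    have h2' : PySem.Int.mod (p.2 - pvMinC grid v) 2 = 1 := h2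
    exact ⟨v, hv, ⟨b1, b2, b3, b4⟩, hval', h1', h2'⟩
  · rintro ⟨v, hv, ⟨b1, b2, b3, b4⟩, hval, h1, h2⟩
    apply List.mem_flatMap.mpr
    refine ⟨_, List.mem_map.mpr ⟨v, hv, rfl⟩, List.mem_filter.mpr ⟨?_, ?_⟩⟩
    · rw [pv_mem_prod]
      refine ⟨b1, ?_, b3, ?_⟩
      · show p.1 < (PySem.List.max? ((pvOccAll grid v).map Prod.fst) (fun x => x)).getD 0 + 1
        unfold pvMaxR at b2; omega
      · show p.2 < (PySem.List.max? ((pvOccAll grid v).map Prod.snd) (fun x => x)).getD 0 + 1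
        unfold pvMaxC at b4; omega
    · show decide (pvVal grid p = v ∧
        (PySem.Int.mod (p.1 - pvMinR grid v) 2 = 1 ∧
         PySem.Int.mod (p.2 - pvMinC grid v) 2 = 1)) = true
      exact decide_eq_true ⟨hval, h1, h2⟩

theorem pv_TL_bounds (grid : List (List Int)) :
    ∀ p ∈ pvTL grid, 0 ≤ p.1 ∧ p.1 < pvRows grid ∧ 0 ≤ p.2 ∧ p.2 < pvCols grid := by
  intro p hp
  obtain ⟨v, hv, ⟨b1, b2, b3, b4⟩, _, _⟩ := (pv_TL_mem grid p).mp hp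
  have hocc := ((pv_mem_distinct grid v).mp hv).2
  have hr := pv_minmax_in_range grid v hocc
  exact ⟨by omega, by omega, by omega, by omega⟩

theorem pv_TL_iff (grid : List (List Int)) (r c : Int)
    (hr : 0 ≤ r) (hrR : r < pvRows grid) (hc : 0 ≤ c) (hcC : c < pvCols grid) :
    ((r, c) ∈ pvTL grid) ↔ (pvVal grid (r, c) ≠ pvBg grid ∧
      PySem.Int.mod (r - pvMinR grid (pvVal grid (r, c))) 2 = 1 ∧
      PySem.Int.mod (c - pvMinC grid (pvVal grid (r, c))) 2 = 1) := by
  rw [pv_TL_mem]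
  constructor
  · rintro ⟨v, hv, _, hval, h1, h2⟩
    rw [hval]
    exact ⟨((pv_mem_distinct grid v).mp hv).1, h1, h2⟩
  · rintro ⟨hne, h1, h2⟩
    have hmem : (r, c) ∈ pvOccAll grid (pvVal grid (r, c)) :=
      List.mem_filter.mpr ⟨(pv_mem_cells _ _ _).mpr ⟨hr, hrR, hc, hcC⟩, by simp⟩
    refine ⟨pvVal grid (r, c),
      (pv_mem_distinct grid _).mpr ⟨hne, List.ne_nil_of_mem hmem⟩,
      pv_occ_bounds grid _ _ hmem, rfl, h1, h2⟩

def pvMinRD (grid : List (List Int)) : PySem.Dict Int Int :=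
  (pvCells (pvRows grid) (pvCols grid)).foldl
    (fun d p => if d.contains (pvVal grid p) = true then d else d.insert (pvVal grid p) p.1)
    PySem.Dict.empty
def pvMinCD (grid : List (List Int)) : PySem.Dict Int Int :=
  (pvCells (pvRows grid) (pvCols grid)).foldl
    (fun d p => if ¬ d.contains (pvVal grid p) = true ∨ p.2 < d.getD (pvVal grid p) 0
      then d.insert (pvVal grid p) p.2 else d)
    PySem.Dict.empty

theorem pv_minRD_getD (grid : List (List Int)) (v : Int) :
    (pvMinRD grid).getD v 0 = pvMinR grid v := pv_minRdict_getD grid v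
theorem pv_minCD_getD (grid : List (List Int)) (v : Int) :
    (pvMinCD grid).getD v 0 = pvMinC grid v := pv_minCdict_getD grid v

def pvBL (grid : List (List Int)) : List (Int × Int) :=
  (pvCells (pvRows grid) (pvCols grid)).filter
    (fun p => decide (pvVal grid p ≠ pvBg grid ∧
      PySem.Int.mod (p.1 - pvMinR grid (pvVal grid p)) 2 = 1 ∧
      PySem.Int.mod (p.2 - pvMinC grid (pvVal grid p)) 2 = 1))

theorem pv_alt_eq (grid : List (List Int)) :
    transform_alt grid = (pvBL grid).foldl (pvUpd (pvBg grid)) grid := by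
  simp only [transform_alt]
  rw [PySem.List.enumerate_eq_map_pyRange grid []]
  rw [List.foldl_map, List.foldl_map]
  dsimp only
  have h1 : List.foldl
      (fun st r =>
        List.foldl
          (fun (st : PySem.Dict Int Int × PySem.Dict Int Int × PySem.Dict Int Int) c =>
            let v := PySem.List.pyGetD (PySem.List.pyGetD grid r []) c 0
            (st.1.insert v (st.1.getD v 0 + 1),
             if st.2.1.contains v = true then st.2.1 else st.2.1.insert v r,
             if ¬ st.2.2.contains v = true ∨ c < st.2.2.getD v 0 then st.2.2.insert v c
             else st.2.2))
          st (PySem.List.pyRange 0 (PySem.List.len (PySem.List.pyGetD grid 0 [])) 1))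
      (PySem.Dict.empty, PySem.Dict.empty, PySem.Dict.empty)
      (PySem.List.pyRange 0 (PySem.List.len grid) 1)
      = (pvCells (pvRows grid) (pvCols grid)).foldl
        (fun (st : PySem.Dict Int Int × PySem.Dict Int Int × PySem.Dict Int Int) p =>
          (st.1.insert (pvVal grid p) (st.1.getD (pvVal grid p) 0 + 1),
           if st.2.1.contains (pvVal grid p) = true then st.2.1
           else st.2.1.insert (pvVal grid p) p.1,
           if ¬ st.2.2.contains (pvVal grid p) = true ∨ p.2 < st.2.2.getD (pvVal grid p) 0
           then st.2.2.insert (pvVal grid p) p.2 else st.2.2))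
        (PySem.Dict.empty, PySem.Dict.empty, PySem.Dict.empty) :=
    pv_foldl_cells (pvRows grid) (pvCols grid)
      (fun (st : PySem.Dict Int Int × PySem.Dict Int Int × PySem.Dict Int Int) p =>
        (st.1.insert (pvVal grid p) (st.1.getD (pvVal grid p) 0 + 1),
         if st.2.1.contains (pvVal grid p) = true then st.2.1
         else st.2.1.insert (pvVal grid p) p.1,
         if ¬ st.2.2.contains (pvVal grid p) = true ∨ p.2 < st.2.2.getD (pvVal grid p) 0
         then st.2.2.insert (pvVal grid p) p.2 else st.2.2))
      (PySem.Dict.empty, PySem.Dict.empty, PySem.Dict.empty)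
  rw [h1]
  rw [PySem.List.foldl_prod_mk
    (f := fun (d : PySem.Dict Int Int) (p : Int × Int) =>
      d.insert (pvVal grid p) (d.getD (pvVal grid p) 0 + 1))
    (g := fun (s2 : PySem.Dict Int Int × PySem.Dict Int Int) (p : Int × Int) =>
      (if s2.1.contains (pvVal grid p) = true then s2.1 else s2.1.insert (pvVal grid p) p.1,
       if ¬ s2.2.contains (pvVal grid p) = true ∨ p.2 < s2.2.getD (pvVal grid p) 0
       then s2.2.insert (pvVal grid p) p.2 else s2.2))]
  rw [PySem.List.foldl_prod_mk
    (f := fun (d : PySem.Dict Int Int) (p : Int × Int) =>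
      if d.contains (pvVal grid p) = true then d else d.insert (pvVal grid p) p.1)
    (g := fun (d : PySem.Dict Int Int) (p : Int × Int) =>
      if ¬ d.contains (pvVal grid p) = true ∨ p.2 < d.getD (pvVal grid p) 0
      then d.insert (pvVal grid p) p.2 else d)]
  dsimp only
  have h2 : (pvVals grid).foldl (fun d x => d.insert x (d.getD x 0 + 1)) PySem.Dict.empty
      = (pvCells (pvRows grid) (pvCols grid)).foldl
        (fun (d : PySem.Dict Int Int) p => d.insert (pvVal grid p) (d.getD (pvVal grid p) 0 + 1))
        PySem.Dict.empty :=
    List.foldl_map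
  rw [← h2, PySem.Dict.foldl_insert_getD_add_one_eq_counter, pv_bgB_eq grid]
  have h3 : (pvCells (pvRows grid) (pvCols grid)).foldl
      (fun (d : PySem.Dict Int Int) (p : Int × Int) =>
        if d.contains (pvVal grid p) = true then d else d.insert (pvVal grid p) p.1)
      PySem.Dict.empty = pvMinRD grid := rfl
  have h4 : (pvCells (pvRows grid) (pvCols grid)).foldl
      (fun (d : PySem.Dict Int Int) (p : Int × Int) =>
        if ¬ d.contains (pvVal grid p) = true ∨ p.2 < d.getD (pvVal grid p) 0
        then d.insert (pvVal grid p) p.2 else d)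
      PySem.Dict.empty = pvMinCD grid := rfl
  rw [h3, h4]
  simp only [pv_minRD_getD, pv_minCD_getD]
  rw [show grid.map (fun row => PySem.List.slice row none none) = grid by
    simp [PySem.List.slice_none_none]]
  have h5 : List.foldl
      (fun out r =>
        List.foldl
          (fun out c =>
            let v := PySem.List.pyGetD (PySem.List.pyGetD grid r []) c 0
            if v ≠ pvBg grid ∧ PySem.Int.mod (r - pvMinR grid v) 2 = 1 ∧
                PySem.Int.mod (c - pvMinC grid v) 2 = 1 then
              PySem.List.pySetD out r (PySem.List.pySetD (PySem.List.pyGetD out r []) c (pvBg grid))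
            else out)
          out (PySem.List.pyRange 0 (PySem.List.len (PySem.List.pyGetD grid 0 [])) 1))
      grid (PySem.List.pyRange 0 (PySem.List.len grid) 1)
      = (pvCells (pvRows grid) (pvCols grid)).foldl
        (fun out p =>
          if pvVal grid p ≠ pvBg grid ∧ PySem.Int.mod (p.1 - pvMinR grid (pvVal grid p)) 2 = 1 ∧
              PySem.Int.mod (p.2 - pvMinC grid (pvVal grid p)) 2 = 1 then
            pvUpd (pvBg grid) out p
          else out)
        grid :=
    pv_foldl_cells (pvRows grid) (pvCols grid)
      (fun out p =>
        if pvVal grid p ≠ pvBg grid ∧ PySem.Int.mod (p.1 - pvMinR grid (pvVal grid p)) 2 = 1 ∧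
            PySem.Int.mod (p.2 - pvMinC grid (pvVal grid p)) 2 = 1 then
          pvUpd (pvBg grid) out p
        else out)
      grid
  rw [h5]
  rw [PySem.List.foldl_ite_eq_foldl_filter
    (fun p : Int × Int => pvVal grid p ≠ pvBg grid ∧
      PySem.Int.mod (p.1 - pvMinR grid (pvVal grid p)) 2 = 1 ∧
      PySem.Int.mod (p.2 - pvMinC grid (pvVal grid p)) 2 = 1)
    (pvUpd (pvBg grid))]
  rfl

theorem pv_transform_eq (grid : List (List Int)) :
    transform grid = (pvTL grid).foldl (pvUpd (pvBg grid)) grid := by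
  simp only [transform]
  have hc : List.foldl
      (fun d r =>
        List.foldl
          (fun d c => d.modify (PySem.List.pyGetD (PySem.List.pyGetD grid r []) c 0) 0 fun x => x + 1)
          d (PySem.List.pyRange 0 (PySem.List.len (PySem.List.pyGetD grid 0 [])) 1))
      PySem.Dict.empty (PySem.List.pyRange 0 (PySem.List.len grid) 1)
      = PySem.Dict.counter (pvVals grid) := by
    have e1 : List.foldl
        (fun d r =>
          List.foldl
            (fun d c => d.modify (PySem.List.pyGetD (PySem.List.pyGetD grid r []) c 0) 0 fun x => x + 1)
            d (PySem.List.pyRange 0 (PySem.List.len (PySem.List.pyGetD grid 0 [])) 1))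
        PySem.Dict.empty (PySem.List.pyRange 0 (PySem.List.len grid) 1)
        = (pvCells (pvRows grid) (pvCols grid)).foldl
          (fun (d : PySem.Dict Int Int) p => d.modify (pvVal grid p) 0 (fun x => x + 1))
          PySem.Dict.empty :=
      pv_foldl_cells (PySem.List.len grid) (PySem.List.len (PySem.List.pyGetD grid 0 []))
        (fun (d : PySem.Dict Int Int) p => d.modify (pvVal grid p) 0 (fun x => x + 1))
        PySem.Dict.empty
    have e2 : (pvVals grid).foldl (fun (d : PySem.Dict Int Int) x => d.modify x 0 (fun x => x + 1))
        PySem.Dict.empty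
        = (pvCells (pvRows grid) (pvCols grid)).foldl
          (fun (d : PySem.Dict Int Int) p => d.modify (pvVal grid p) 0 (fun x => x + 1))
          PySem.Dict.empty :=
      List.foldl_map
    rw [e1, ← e2, ← PySem.Dict.counter_eq_foldl]
  rw [hc, pv_bg_eq grid, pv_bgB_eq grid]
  have e3 : List.foldl
      (fun d r =>
        List.foldl
          (fun d c =>
            if PySem.List.pyGetD (PySem.List.pyGetD grid r []) c 0 ≠ pvBg grid then
              d.insert (PySem.List.pyGetD (PySem.List.pyGetD grid r []) c 0)
                (d.getD (PySem.List.pyGetD (PySem.List.pyGetD grid r []) c 0) [] ++ [(r, c)])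
            else d)
          d (PySem.List.pyRange 0 (PySem.List.len (PySem.List.pyGetD grid 0 [])) 1))
      PySem.Dict.empty (PySem.List.pyRange 0 (PySem.List.len grid) 1)
      = (pvCells (pvRows grid) (pvCols grid)).foldl
        (fun (d : PySem.Dict Int (List (Int × Int))) p =>
          if pvVal grid p ≠ pvBg grid then
            d.insert (pvVal grid p) (d.getD (pvVal grid p) [] ++ [p])
          else d)
        PySem.Dict.empty :=
    pv_foldl_cells (PySem.List.len grid) (PySem.List.len (PySem.List.pyGetD grid 0 []))
      (fun (d : PySem.Dict Int (List (Int × Int))) p =>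
        if pvVal grid p ≠ pvBg grid then
          d.insert (pvVal grid p) (d.getD (pvVal grid p) [] ++ [p])
        else d)
      PySem.Dict.empty
  rw [e3, PySem.List.foldl_ite_eq_foldl_filter
    (fun p : Int × Int => pvVal grid p ≠ pvBg grid)
    (fun (d : PySem.Dict Int (List (Int × Int))) p =>
      d.insert (pvVal grid p) (d.getD (pvVal grid p) [] ++ [p]))]
  rw [show (pvCells (pvRows grid) (pvCols grid)).filter
      (fun p => decide (pvVal grid p ≠ pvBg grid)) = pvCellsNB grid from rfl]
  rw [pv_colorCells_items grid]
  unfold pvTL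
  rw [List.foldl_flatMap]
  apply PySem.List.foldl_congr_mem
  intro res q _
  have e4 : List.foldl
      (fun result r =>
        List.foldl
          (fun result c =>
            if PySem.List.pyGetD (PySem.List.pyGetD grid r []) c 0 = q.1 then
              if PySem.Int.mod (r - (PySem.List.min? (List.map Prod.fst q.2) fun x => x).getD 0) 2 = 1 ∧
                  PySem.Int.mod (c - (PySem.List.min? (List.map Prod.snd q.2) fun x => x).getD 0) 2 = 1 then
                PySem.List.pySetD result r
                  (PySem.List.pySetD (PySem.List.pyGetD result r []) c (pvBg grid))
              else result
            else result)
          result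
          (PySem.List.pyRange ((PySem.List.min? (List.map Prod.snd q.2) fun x => x).getD 0)
            ((PySem.List.max? (List.map Prod.snd q.2) fun x => x).getD 0 + 1) 1))
      res
      (PySem.List.pyRange ((PySem.List.min? (List.map Prod.fst q.2) fun x => x).getD 0)
        ((PySem.List.max? (List.map Prod.fst q.2) fun x => x).getD 0 + 1) 1)
      = ((PySem.List.pyRange ((PySem.List.min? (q.2.map Prod.fst) (fun x => x)).getD 0)
            ((PySem.List.max? (q.2.map Prod.fst) (fun x => x)).getD 0 + 1) 1).flatMap (fun r =>
          (PySem.List.pyRange ((PySem.List.min? (q.2.map Prod.snd) (fun x => x)).getD 0)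
            ((PySem.List.max? (q.2.map Prod.snd) (fun x => x)).getD 0 + 1) 1).map
            (fun c => (r, c)))).foldl
        (fun result p =>
          if pvVal grid p = q.1 then
            if PySem.Int.mod (p.1 - (PySem.List.min? (q.2.map Prod.fst) (fun x => x)).getD 0) 2 = 1 ∧
                PySem.Int.mod (p.2 - (PySem.List.min? (q.2.map Prod.snd) (fun x => x)).getD 0) 2 = 1 then
              pvUpd (pvBg grid) result p
            else result
          else result)
        res :=
    pv_foldl_nested _ _
      (fun result p =>
        if pvVal grid p = q.1 then
          if PySem.Int.mod (p.1 - (PySem.List.min? (q.2.map Prod.fst) (fun x => x)).getD 0) 2 = 1 ∧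
              PySem.Int.mod (p.2 - (PySem.List.min? (q.2.map Prod.snd) (fun x => x)).getD 0) 2 = 1 then
            pvUpd (pvBg grid) result p
          else result
        else result)
      res
  rw [e4]
  have e5 : (fun (result : List (List Int)) (p : Int × Int) =>
      if pvVal grid p = q.1 then
        if PySem.Int.mod (p.1 - (PySem.List.min? (q.2.map Prod.fst) (fun x => x)).getD 0) 2 = 1 ∧
            PySem.Int.mod (p.2 - (PySem.List.min? (q.2.map Prod.snd) (fun x => x)).getD 0) 2 = 1 then
          pvUpd (pvBg grid) result p
        else result
      else result)
      = (fun result p =>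
        if pvVal grid p = q.1 ∧
            (PySem.Int.mod (p.1 - (PySem.List.min? (q.2.map Prod.fst) (fun x => x)).getD 0) 2 = 1 ∧
             PySem.Int.mod (p.2 - (PySem.List.min? (q.2.map Prod.snd) (fun x => x)).getD 0) 2 = 1) then
          pvUpd (pvBg grid) result p
        else result) := by
    funext result p
    by_cases hA : pvVal grid p = q.1
    · by_cases hB : PySem.Int.mod (p.1 - (PySem.List.min? (q.2.map Prod.fst) (fun x => x)).getD 0) 2 = 1 ∧
          PySem.Int.mod (p.2 - (PySem.List.min? (q.2.map Prod.snd) (fun x => x)).getD 0) 2 = 1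
      · simp [hA]
      · simp [hA]
    · simp [hA]
  rw [e5, PySem.List.foldl_ite_eq_foldl_filter
    (fun p : Int × Int => pvVal grid p = q.1 ∧
      (PySem.Int.mod (p.1 - (PySem.List.min? (q.2.map Prod.fst) (fun x => x)).getD 0) 2 = 1 ∧
       PySem.Int.mod (p.2 - (PySem.List.min? (q.2.map Prod.snd) (fun x => x)).getD 0) 2 = 1))
    (pvUpd (pvBg grid))]

theorem pv_get2_getD (m : List (List Int)) (i j : Nat) :
    pvGet2 m (i : Int) (j : Int) = (m.getD i []).getD j 0 := by
  simp [pvGet2]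

theorem pv_get2_elem (m : List (List Int)) (i j : Nat) (hi : i < m.length)
    (hj : j < (m[i]'hi).length) : pvGet2 m (i : Int) (j : Int) = (m[i]'hi)[j]'hj := by
  rw [pv_get2_getD]
  rw [show m.getD i [] = m[i]'hi from by
    rw [List.getD_eq_getElem?_getD, List.getElem?_eq_getElem hi]; rfl]
  rw [List.getD_eq_getElem?_getD, List.getElem?_eq_getElem hj]
  rfl

theorem pv_BL_mem (grid : List (List Int)) (p : Int × Int) :
    p ∈ pvBL grid ↔ p ∈ pvTL grid := by
  cases p with
  | mk r c =>
    constructor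
    · intro h
      obtain ⟨hc, hcond⟩ := List.mem_filter.mp h
      obtain ⟨b1, b2, b3, b4⟩ := (pv_mem_cells _ _ _).mp hc
      exact (pv_TL_iff grid r c b1 b2 b3 b4).mpr (of_decide_eq_true hcond)
    · intro h
      obtain ⟨b1, b2, b3, b4⟩ := pv_TL_bounds grid _ h
      exact List.mem_filter.mpr ⟨(pv_mem_cells _ _ _).mpr ⟨b1, b2, b3, b4⟩,
        decide_eq_true ((pv_TL_iff grid r c b1 b2 b3 b4).mp h)⟩

theorem pv_main (grid : List (List Int))
    (h1 : grid ≠ []) (h2 : grid.headD [] ≠ [])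
    (h3 : ∀ row ∈ grid, (grid.headD []).length ≤ row.length) :
    transform grid = transform_alt grid := by
  rw [pv_transform_eq, pv_alt_eq]
  have hrows : pvRows grid = (grid.length : Int) := by simp [pvRows]
  have hcols0 : PySem.List.pyGetD grid 0 [] = grid.headD [] := by
    cases grid with
    | nil => rfl
    | cons x xs => simp [PySem.List.pyGetD_zero_cons]
  have hcols : pvCols grid = ((grid.headD []).length : Int) := by
    simp [pvCols, hcols0]
  have hrowlen : ∀ i : Nat, i < grid.length → pvCols grid ≤ ((grid.getD i []).length : Int) := by
    intro i hi
    rw [hcols]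
    have hmem : grid.getD i [] ∈ grid := by
      rw [List.getD_eq_getElem?_getD, List.getElem?_eq_getElem hi]
      exact List.getElem_mem hi
    exact_mod_cast h3 _ hmem
  have hboundsTL : ∀ p ∈ pvTL grid, 0 ≤ p.1 ∧ p.1 < (grid.length : Int) ∧ 0 ≤ p.2 ∧
      p.2 < ((grid.getD p.1.toNat []).length : Int) := by
    intro p hp
    obtain ⟨b1, b2, b3, b4⟩ := pv_TL_bounds grid p hp
    rw [hrows] at b2
    refine ⟨b1, b2, b3, ?_⟩
    have hi : p.1.toNat < grid.length := by omega
    have := hrowlen p.1.toNat hi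
    omega
  have hboundsBL : ∀ p ∈ pvBL grid, 0 ≤ p.1 ∧ p.1 < (grid.length : Int) ∧ 0 ≤ p.2 ∧
      p.2 < ((grid.getD p.1.toNat []).length : Int) :=
    fun p hp => hboundsTL p ((pv_BL_mem grid p).mp hp)
  obtain ⟨hlenA, hrlA, hgetA⟩ := pv_foldl_upd (pvBg grid) (pvTL grid) grid hboundsTL
  obtain ⟨hlenB, hrlB, hgetB⟩ := pv_foldl_upd (pvBg grid) (pvBL grid) grid hboundsBL
  apply List.ext_getElem
  · rw [hlenA, hlenB]
  · intro i hL hR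
    have hiL : i < grid.length := by rw [hlenA] at hL; exact hL
    have hA := hrlA i
    have hB := hrlB i
    rw [List.getElem?_eq_getElem hL, List.getElem?_eq_getElem hiL] at hA
    rw [List.getElem?_eq_getElem hR, List.getElem?_eq_getElem hiL] at hB
    simp only [Option.map_some, Option.some.injEq] at hA hB
    apply List.ext_getElem
    · rw [hA, hB]
    · intro j hjL hjR
      have eA : (((pvTL grid).foldl (pvUpd (pvBg grid)) grid)[i]'hL)[j]'hjL
          = pvGet2 ((pvTL grid).foldl (pvUpd (pvBg grid)) grid) (i : Int) (j : Int) :=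
        (pv_get2_elem _ i j hL hjL).symm
      have eB : (((pvBL grid).foldl (pvUpd (pvBg grid)) grid)[i]'hR)[j]'hjR
          = pvGet2 ((pvBL grid).foldl (pvUpd (pvBg grid)) grid) (i : Int) (j : Int) :=
        (pv_get2_elem _ i j hR hjR).symm
      rw [eA, eB, hgetA (i : Int) (j : Int) (by omega) (by omega),
          hgetB (i : Int) (j : Int) (by omega) (by omega)]
      simp only [pv_BL_mem]

-- ===== VERDICT (by name: the statement is the Claim_ definition above) =====
theorem transform_spec : Claim_equal_transform := by
  intro grid _ hpre
  obtain ⟨ha, hb, hc⟩ := hpre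
  unfold Spec_transform
  exact pv_main grid ha hb hc
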